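-- pv_equiv track=rewrite | github.com/aniaodoj66/WDI | sprawdziany/2019/2_2019_inne.py | dwojkowy
-- ===== SOURCE A (Python) =====
-- def dwojkowy(x):
--     k = 1
--     n = 0
--     while x > 0:
--         n += (x % 2) * k
--         k *= 10
--         x = x // 2
--     return n
-- ===== SOURCE B (Python) =====
-- def dwojkowy(x):
--     if x <= 0:
--         return 0
--     return dwojkowy(x // 2) * 10 + x % 2
-- ===== Notes on version B (the rewrite author's own statement) =====
-- stated objective: alternative
-- what changed: Replaced the iterative low-to-high accumulator loop (carrying a power-of-ten multiplier k) with a direct recursion on the high bits that appends the current bit on the way back up, needing no auxiliary state.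
import Mathlib
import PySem

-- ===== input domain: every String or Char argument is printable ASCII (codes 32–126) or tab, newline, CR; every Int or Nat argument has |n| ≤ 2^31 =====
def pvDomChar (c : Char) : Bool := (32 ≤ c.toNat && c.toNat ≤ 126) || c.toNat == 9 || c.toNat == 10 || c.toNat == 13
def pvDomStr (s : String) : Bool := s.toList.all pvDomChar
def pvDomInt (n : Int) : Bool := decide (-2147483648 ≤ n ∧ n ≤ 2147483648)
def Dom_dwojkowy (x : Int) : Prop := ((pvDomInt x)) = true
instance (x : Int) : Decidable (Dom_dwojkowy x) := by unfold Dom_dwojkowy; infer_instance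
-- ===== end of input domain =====

-- B replaces A's iterative accumulator loop (power-of-ten multiplier) with a direct recursion on the high bits; same cost, different decomposition.


-- ===== PORT A =====
-- while x > 0: n += (x % 2) * k; k *= 10; x = x // 2
def dwojkowyLoop (x k n : Int) : Int :=
  if _h : x > 0 then
    dwojkowyLoop (PySem.Int.floordiv x 2) (k * 10) (n + PySem.Int.mod x 2 * k)
  else n
termination_by x.toNat
decreasing_by
  rw [PySem.Int.floordiv_eq_ediv_of_pos (by omega)]
  omega

def dwojkowy (x : Int) : Int := dwojkowyLoop x 1 0

-- ===== PORT B =====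
def dwojkowy_alt (x : Int) : Int :=
  if _h : x ≤ 0 then 0
  else dwojkowy_alt (PySem.Int.floordiv x 2) * 10 + PySem.Int.mod x 2
termination_by x.toNat
decreasing_by
  rw [PySem.Int.floordiv_eq_ediv_of_pos (by omega)]
  omega

-- ===== PRECONDITION & SPEC =====
def Spec_dwojkowy (x : Int) (out : Int) : Prop := out = dwojkowy_alt x
instance (x : Int) (out : Int) : Decidable (Spec_dwojkowy x out) := by unfold Spec_dwojkowy; infer_instance

-- ===== CLAIM (what is proved, stated in full; the proofs are below) =====
def Claim_equal_dwojkowy : Prop := ∀ (x : Int), Dom_dwojkowy x → Spec_dwojkowy x (dwojkowy x)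

-- ===== LEMMAS AND PROOFS =====
theorem dwojkowyLoop_eq (x k n : Int) : dwojkowyLoop x k n = n + k * dwojkowy_alt x := by
  induction x, k, n using dwojkowyLoop.induct with
  | case1 x k n h ih =>
    have hx : dwojkowy_alt x
        = dwojkowy_alt (PySem.Int.floordiv x 2) * 10 + PySem.Int.mod x 2 := by
      rw [dwojkowy_alt]; rw [dif_neg (by omega)]
    rw [dwojkowyLoop, dif_pos h, ih, hx]
    ring
  | case2 x k n h =>
    have hx : dwojkowy_alt x = 0 := by rw [dwojkowy_alt]; rw [dif_pos (by omega)]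
    rw [dwojkowyLoop, dif_neg h, hx]
    ring

-- ===== VERDICT (by name: the statement is the Claim_ definition above) =====
theorem dwojkowy_spec : Claim_equal_dwojkowy := by
  intro x _
  unfold Spec_dwojkowy dwojkowy
  rw [dwojkowyLoop_eq]
  ring
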